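-- pv_equiv track=rewrite | github.com/HarikaraPrashath/RP-Server | CV_extractor/resume_pipeline.py | segment_sections
-- ===== SOURCE A (Python) =====
-- from typing import List, Dict, Any, Optional
--
-- DEFAULT_SECTION_HEADERS = {
--     "summary": ["summary", "profile", "about", "objective"],
--     "skills": ["skills", "technical skills", "core skills", "tools", "technologies"],
--     "experience": ["experience", "work experience", "employment", "professional experience", "work history"],
--     "education": ["education", "academic", "qualifications"],
--     "projects": ["projects", "personal projects", "key projects"],
--     "certifications": ["certifications", "certificates"],
--     "awards": ["awards", "achievements"],
-- }
--
-- def segment_sections(text: str, headers: Dict[str, List[str]] = DEFAULT_SECTION_HEADERS) -> Dict[str, str]: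
--     """
--     Simple header-based segmentation.
--     Works best when resumes have clear headings like "Education", "Experience", etc.
--     """
--     lines = [ln.strip() for ln in text.split("\n") if ln.strip()]
--
--     header_map: Dict[str, str] = {}
--     for section, variants in headers.items():
--         for v in variants:
--             header_map[v.lower()] = section
--
--     sections: Dict[str, List[str]] = {"other": []}
--     current = "other"
--
--     for ln in lines:
--         key = ln.lower().strip(": -\t")
--         if key in header_map:
--             current = header_map[key]
--             sections.setdefault(current, [])
--             continue
--
--         sections.setdefault(current, [])
--         sections[current].append(ln)
--
--     out: Dict[str, str] = {}
--     for k, v in sections.items():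
--         joined = "\n".join(v).strip()
--         if joined:
--             out[k] = joined
--     return out
-- ===== SOURCE B (Python) =====
-- DEFAULT_SECTION_HEADERS = {
--     "summary": ["summary", "profile", "about", "objective"],
--     "skills": ["skills", "technical skills", "core skills", "tools", "technologies"],
--     "experience": ["experience", "work experience", "employment", "professional experience", "work history"],
--     "education": ["education", "academic", "qualifications"],
--     "projects": ["projects", "personal projects", "key projects"],
--     "certifications": ["certifications", "certificates"],
--     "awards": ["awards", "achievements"],
-- }
--
-- def segment_sections(text, headers=DEFAULT_SECTION_HEADERS):
--     """Boundaries-then-slices segmentation: split the line list into runs at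
--     header lines, then merge each run's block into its section."""
--     header_map = {v.lower(): sec for sec, variants in headers.items() for v in variants}
--
--     def norm(ln):
--         return ln.lower().strip(": -\t")
--
--     lines = [ln.strip() for ln in text.split("\n") if ln.strip()]
--
--     def runs(rest, current):
--         # one (section, block) run per segment; recurse past the next header
--         block = []
--         while rest and norm(rest[0]) not in header_map:
--             block.append(rest[0])
--             rest = rest[1:]
--         if not rest:
--             return [(current, block)]
--         return [(current, block)] + runs(rest[1:], header_map[norm(rest[0])])
--
--     blocks = {}
--     for sec, block in runs(lines, "other"):
--         if sec in blocks:
--             blocks[sec] = blocks[sec] + block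
--         else:
--             blocks[sec] = block
--
--     out = {}
--     for k, v in blocks.items():
--         joined = "\n".join(v).strip()
--         if joined:
--             out[k] = joined
--     return out
-- ===== Notes on version B (the rewrite author's own statement) =====
-- stated objective: alternative
-- what changed: Replaces A's single stateful carry-forward pass (per-line setdefault/append into a dict under a mutable 'current') with a two-phase decomposition: recursively split the line list into (section, block) runs at header boundaries, then merge whole blocks per section.
import Mathlib
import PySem

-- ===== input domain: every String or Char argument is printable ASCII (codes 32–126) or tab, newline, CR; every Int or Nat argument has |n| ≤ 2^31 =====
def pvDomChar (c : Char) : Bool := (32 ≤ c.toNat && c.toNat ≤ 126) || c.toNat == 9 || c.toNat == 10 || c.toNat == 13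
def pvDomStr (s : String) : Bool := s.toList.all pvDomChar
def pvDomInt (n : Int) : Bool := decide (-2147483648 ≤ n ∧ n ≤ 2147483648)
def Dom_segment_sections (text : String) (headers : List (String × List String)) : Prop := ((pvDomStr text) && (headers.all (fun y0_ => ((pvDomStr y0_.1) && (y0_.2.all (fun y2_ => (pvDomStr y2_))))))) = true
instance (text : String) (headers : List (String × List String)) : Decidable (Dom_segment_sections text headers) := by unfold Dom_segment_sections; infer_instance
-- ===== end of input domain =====

-- B replaces A's single stateful carry-forward pass with a boundaries-then-runs decomposition (alternative, not faster); return values proved equal.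

-- ===== PORT A =====
-- key = ln.lower().strip(": -\t")
def segNorm (ln : String) : String := PySem.Str.stripChars (PySem.Str.lower ln) ": -\t"

-- lines = [ln.strip() for ln in text.split("\n") if ln.strip()]
def segLines (text : String) : List String :=
  ((PySem.Str.split? text "\n").getD []).foldl
    (fun acc ln => if PySem.Str.strip ln ≠ "" then acc ++ [PySem.Str.strip ln] else acc) []

-- header_map built by the nested for-loops (later variants overwrite)
def segHeaderMap (headers : List (String × List String)) : PySem.Dict String String :=
  headers.foldl (fun hm p => p.2.foldl (fun hm v => hm.insert (PySem.Str.lower v) p.1) hm)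
    PySem.Dict.empty

-- the body of A's main for-loop over lines, state = (sections, current)
def segStepA (hm : PySem.Dict String String)
    (st : PySem.Dict String (List String) × String) (ln : String) :
    PySem.Dict String (List String) × String :=
  let key := segNorm ln
  match hm.get? key with                      -- 'if key in header_map'
  | some sec => (st.1.setdefault sec [], sec)
  | none =>
    let d := st.1.setdefault st.2 []
    (d.insert st.2 (d.getD st.2 [] ++ [ln]), st.2)

-- final loop: join, strip, keep non-empty
def segFinish (sections : PySem.Dict String (List String)) : List (String × String) :=
  (sections.items.foldl
    (fun out kv =>
      let joined := PySem.Str.strip (PySem.Str.join "\n" kv.2)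
      if joined ≠ "" then out.insert kv.1 joined else out)
    PySem.Dict.empty).items

def segment_sections (text : String) (headers : List (String × List String)) : List (String × String) :=
  let hm := segHeaderMap headers
  let sections := (segLines text).foldl (segStepA hm) (PySem.Dict.empty.insert "other" [], "other")
  segFinish sections.1

-- ===== PORT B =====
def altNorm (ln : String) : String := PySem.Str.stripChars (PySem.Str.lower ln) ": -\t"

def altLines (text : String) : List String :=
  ((PySem.Str.split? text "\n").getD []).foldl
    (fun acc ln => if PySem.Str.strip ln ≠ "" then acc ++ [PySem.Str.strip ln] else acc) []

def altHeaderMap (headers : List (String × List String)) : PySem.Dict String String :=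
  headers.foldl (fun hm p => p.2.foldl (fun hm v => hm.insert (PySem.Str.lower v) p.1) hm)
    PySem.Dict.empty

-- 'norm(ln) not in header_map'
def altIsBody (hm : PySem.Dict String String) (ln : String) : Bool := !(hm.contains (altNorm ln))

-- runs(rest, current): the while loop is takeWhile/dropWhile over the same test;
-- header_map[norm(hd)] is guarded by the dropWhile stop, so getD "" is exact here
def altRuns (hm : PySem.Dict String String) (rest : List String) (current : String) :
    List (String × List String) :=
  let block := rest.takeWhile (altIsBody hm)
  match h : rest.dropWhile (altIsBody hm) with
  | [] => [(current, block)]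
  | hd :: tl => (current, block) :: altRuns hm tl (hm.getD (altNorm hd) "")
termination_by rest.length
decreasing_by
  have := (List.dropWhile_sublist (l := rest) (p := altIsBody hm)).length_le
  rw [h] at this; simp at this; omega

-- 'if sec in blocks: blocks[sec] = blocks[sec] + block else: blocks[sec] = block'
def altStepB (bl : PySem.Dict String (List String)) (r : String × List String) :
    PySem.Dict String (List String) :=
  if bl.contains r.1 then bl.insert r.1 (bl.getD r.1 [] ++ r.2) else bl.insert r.1 r.2

def altFinish (blocks : PySem.Dict String (List String)) : List (String × String) :=
  (blocks.items.foldl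
    (fun out kv =>
      let joined := PySem.Str.strip (PySem.Str.join "\n" kv.2)
      if joined ≠ "" then out.insert kv.1 joined else out)
    PySem.Dict.empty).items

def segment_sections_alt (text : String) (headers : List (String × List String)) : List (String × String) :=
  let hm := altHeaderMap headers
  let blocks := (altRuns hm (altLines text) "other").foldl altStepB PySem.Dict.empty
  altFinish blocks

-- ===== PRECONDITION & SPEC =====
def Spec_segment_sections (text : String) (headers : List (String × List String)) (out : List (String × String)) : Prop := out = segment_sections_alt text headers
instance (text : String) (headers : List (String × List String)) (out : List (String × String)) : Decidable (Spec_segment_sections text headers out) := by unfold Spec_segment_sections; infer_instance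

-- ===== CLAIM (what is proved, stated in full; the proofs are below) =====
def Claim_equal_segment_sections : Prop := ∀ (text : String) (headers : List (String × List String)), Dom_segment_sections text headers → Spec_segment_sections text headers (segment_sections text headers)


-- ===== LEMMAS AND PROOFS =====

-- the canonical dict step both loops amount to: append l to the entry at k (creating it if absent)
def segPush (d : PySem.Dict String (List String)) (k : String) (l : List String) :
    PySem.Dict String (List String) := d.insert k (d.getD k [] ++ l)

theorem segNorm_eq_altNorm : segNorm = altNorm := rfl

theorem segPush_push (d : PySem.Dict String (List String)) (k : String) (l1 l2 : List String) :
    segPush (segPush d k l1) k l2 = segPush d k (l1 ++ l2) := by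
  unfold segPush
  rw [PySem.Dict.getD_insert_self, PySem.Dict.insert_insert_self, List.append_assoc]

theorem seg_insert_getD (d : PySem.Dict String (List String)) (k : String) (v0 : List String)
    (hnd : d.keys.Nodup) (hc : d.contains k = true) : d.insert k (d.getD k v0) = d := by
  apply PySem.Dict.ext
  rw [PySem.Dict.items_insert_of_contains d _ hc]
  conv_rhs => rw [← List.map_id d.items]
  apply List.map_congr_left
  intro p hp
  by_cases hk : (p.1 == k) = true
  · simp only [hk, if_pos]
    have hk' : p.1 = k := by simpa using hk
    have hpm : (k, p.2) ∈ d.items := by rw [← hk']; exact hp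
    have := PySem.Dict.getD_of_mem_items d hpm hnd v0
    rw [this, ← hk']
    rfl
  · simp only [hk]; rfl

theorem segPush_nil (d : PySem.Dict String (List String)) (k : String)
    (hnd : d.keys.Nodup) (hc : d.contains k = true) : segPush d k [] = d := by
  unfold segPush; rw [List.append_nil]; exact seg_insert_getD d k [] hnd hc

theorem seg_setdefault_eq_push (d : PySem.Dict String (List String)) (k : String)
    (hnd : d.keys.Nodup) : d.setdefault k [] = segPush d k [] := by
  by_cases hc : d.contains k = true
  · rw [PySem.Dict.setdefault_of_contains d _ hc, segPush_nil d k hnd hc]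
  · have hc' : d.contains k = false := by simpa using hc
    rw [PySem.Dict.setdefault_of_not_contains d _ hc']
    unfold segPush
    rw [PySem.Dict.getD_of_not_contains d _ hc', List.append_nil]

theorem segPush_nodup (d : PySem.Dict String (List String)) (k : String) (l : List String)
    (hnd : d.keys.Nodup) : (segPush d k l).keys.Nodup :=
  PySem.Dict.nodup_keys_insert d k _ hnd

theorem segPush_contains (d : PySem.Dict String (List String)) (k : String) (l : List String) :
    (segPush d k l).contains k = true :=
  PySem.Dict.contains_insert_self d k _

theorem altStepB_eq_push (bl : PySem.Dict String (List String)) (r : String × List String) :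
    altStepB bl r = segPush bl r.1 r.2 := by
  unfold altStepB segPush
  split_ifs with h
  · rfl
  · rw [PySem.Dict.getD_of_not_contains _ _ (by simpa using h), List.nil_append]

theorem altRuns_nil_eq (hm : PySem.Dict String String) (rest : List String) (current : String)
    (hdw : rest.dropWhile (altIsBody hm) = []) :
    altRuns hm rest current = [(current, rest.takeWhile (altIsBody hm))] := by
  rw [altRuns]
  split
  · rfl
  · rename_i hd tl heq
    rw [hdw] at heq
    cases heq

theorem altRuns_cons_eq (hm : PySem.Dict String String) (rest : List String) (current : String)
    (hd : String) (tl : List String) (hdw : rest.dropWhile (altIsBody hm) = hd :: tl) :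
    altRuns hm rest current
      = (current, rest.takeWhile (altIsBody hm)) :: altRuns hm tl (hm.getD (altNorm hd) "") := by
  rw [altRuns]
  split
  · rename_i heq
    rw [hdw] at heq
    cases heq
  · rename_i hd' tl' heq
    rw [hdw] at heq
    injection heq with h1 h2
    rw [h1, h2]

theorem altRuns_shape (hm : PySem.Dict String String) (rest : List String) (current : String) :
    ∃ b rs, altRuns hm rest current = (current, b) :: rs := by
  cases hdw : rest.dropWhile (altIsBody hm) with
  | nil => exact ⟨_, _, altRuns_nil_eq hm rest current hdw⟩
  | cons hd tl => exact ⟨_, _, altRuns_cons_eq hm rest current hd tl hdw⟩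

-- a leading 'segPush X c []' is absorbed by the first run, whose key is c
theorem seg_foldl_runs_push_nil (hm : PySem.Dict String String) (rest : List String) (c : String)
    (X : PySem.Dict String (List String)) :
    (altRuns hm rest c).foldl altStepB (segPush X c []) = (altRuns hm rest c).foldl altStepB X := by
  obtain ⟨b, rs, heq⟩ := altRuns_shape hm rest c
  rw [heq, List.foldl_cons, List.foldl_cons, altStepB_eq_push, altStepB_eq_push]
  simp only
  rw [segPush_push, List.nil_append]

-- A's loop over a header-free block is one segPush
theorem seg_blockFold (hm : PySem.Dict String String) (block : List String) (c : String)
    (d : PySem.Dict String (List String))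
    (hb : ∀ ln ∈ block, hm.contains (altNorm ln) = false)
    (hnd : d.keys.Nodup) (hc : d.contains c = true) :
    block.foldl (segStepA hm) (d, c) = (segPush d c block, c) := by
  induction block generalizing d with
  | nil => rw [List.foldl_nil, segPush_nil d c hnd hc]
  | cons ln bl ih =>
    have hln : hm.contains (altNorm ln) = false := hb ln (by simp)
    have hget : hm.get? (segNorm ln) = none := by
      rw [segNorm_eq_altNorm]
      exact (PySem.Dict.get?_eq_none_iff_contains hm _).mpr hln
    have hstep : segStepA hm (d, c) ln = (segPush d c [ln], c) := by
      simp only [segStepA, hget]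
      rw [PySem.Dict.setdefault_of_contains d _ hc]
      rfl
    rw [List.foldl_cons, hstep,
      ih (segPush d c [ln]) (fun x hx => hb x (List.mem_cons_of_mem _ hx))
        (segPush_nodup d c [ln] hnd) (segPush_contains d c [ln]),
      segPush_push, List.singleton_append]

-- MAIN: A's stateful pass equals folding B's runs
theorem seg_main (hm : PySem.Dict String String) :
    ∀ (n : Nat) (rest : List String), rest.length ≤ n →
    ∀ (c : String) (d : PySem.Dict String (List String)), d.keys.Nodup → d.contains c = true →
    (rest.foldl (segStepA hm) (d, c)).1 = (altRuns hm rest c).foldl altStepB d := by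
  intro n
  induction n with
  | zero =>
    intro rest hlen c d hnd hc
    have hrest : rest = [] := List.length_eq_zero_iff.mp (Nat.le_zero.mp hlen)
    subst hrest
    rw [altRuns_nil_eq hm [] c List.dropWhile_nil]
    simp only [List.takeWhile_nil, List.foldl_nil, List.foldl_cons, altStepB_eq_push]
    rw [segPush_nil d c hnd hc]
  | succ n ih =>
    intro rest hlen c d hnd hc
    have hsplit := List.takeWhile_append_dropWhile (p := altIsBody hm) (l := rest)
    have hb : ∀ ln ∈ rest.takeWhile (altIsBody hm), hm.contains (altNorm ln) = false := by
      intro ln hln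
      have := List.mem_takeWhile_imp hln
      simpa [altIsBody] using this
    cases hdw : rest.dropWhile (altIsBody hm) with
    | nil =>
      have hrest : rest.takeWhile (altIsBody hm) = rest := by
        conv_rhs => rw [← hsplit]
        rw [hdw, List.append_nil]
      conv_lhs => rw [← hrest]
      rw [seg_blockFold hm _ c d hb hnd hc, altRuns_nil_eq hm rest c hdw]
      rw [List.foldl_cons, List.foldl_nil, altStepB_eq_push]
    | cons hd tl =>
      have hhd : hm.contains (altNorm hd) = true := by
        have hne : rest.dropWhile (altIsBody hm) ≠ [] := by simp [hdw]
        have h1 := List.head_dropWhile_not (altIsBody hm) hne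
        have h2 : (rest.dropWhile (altIsBody hm)).head hne = hd := by simp [hdw]
        rw [h2] at h1
        simpa [altIsBody] using h1
      obtain ⟨v, hv⟩ : ∃ v, hm.get? (altNorm hd) = some v := by
        have h3 := PySem.Dict.contains_eq_isSome_get? hm (altNorm hd)
        rw [hhd] at h3
        exact Option.isSome_iff_exists.mp h3.symm
      have hlen' : tl.length ≤ n := by
        have hsub := (List.dropWhile_sublist (l := rest) (p := altIsBody hm)).length_le
        rw [hdw] at hsub
        simp only [List.length_cons] at hsub
        omega
      have hgetv : hm.get? (segNorm hd) = some v := by rw [segNorm_eq_altNorm]; exact hv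
      have hstep : segStepA hm (segPush d c (rest.takeWhile (altIsBody hm)), c) hd
          = (segPush (segPush d c (rest.takeWhile (altIsBody hm))) v [], v) := by
        simp only [segStepA, hgetv]
        rw [seg_setdefault_eq_push _ _ (segPush_nodup d c _ hnd)]
      conv_lhs => rw [← hsplit]
      rw [List.foldl_append, seg_blockFold hm _ c d hb hnd hc, hdw, List.foldl_cons, hstep,
        ih tl hlen' v _ (segPush_nodup _ v [] (segPush_nodup d c _ hnd)) (segPush_contains _ v []),
        seg_foldl_runs_push_nil, altRuns_cons_eq hm rest c hd tl hdw]
      rw [List.foldl_cons, altStepB_eq_push]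
      simp only
      rw [PySem.Dict.getD_of_get?_eq_some hm "" hv]

-- ===== VERDICT (by name: the statement is the Claim_ definition above) =====
theorem segment_sections_spec : Claim_equal_segment_sections := by
  intro text headers _
  unfold Spec_segment_sections segment_sections segment_sections_alt
  simp only
  rw [show segLines = altLines from rfl, show segHeaderMap = altHeaderMap from rfl,
    show segFinish = altFinish from rfl]
  apply congrArg altFinish
  rw [seg_main (altHeaderMap headers) (altLines text).length (altLines text) le_rfl "other"
      (PySem.Dict.empty.insert "other" [])
      (PySem.Dict.nodup_keys_insert _ _ _ PySem.Dict.nodup_keys_empty)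
      (PySem.Dict.contains_insert_self _ _ _)]
  have he : PySem.Dict.empty.insert "other" ([] : List String)
      = segPush PySem.Dict.empty "other" [] := by
    unfold segPush
    rw [PySem.Dict.getD_empty, List.append_nil]
  rw [he, seg_foldl_runs_push_nil]
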